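-- pv_equiv track=rewrite | github.com/Qniara/Informatyka | Klasa3/cw_02_01_2025.py | CzyRosnacoMalejacy
-- ===== SOURCE A (Python) =====
-- def CzyRosnacy(tab):
--     n=len(tab)
--     for i in range(1,n):
--         if(tab[i-1]<tab[i]):
--             return False
--     return True
--
-- def CzyMalejacy(tab):
--     n=len(tab)
--     for i in range(1,n):
--         if not (tab[i-1]<tab[i]):
--             return False
--     return True
--
-- def CzyRosnacoMalejacy(tab):
--     n=len(tab)
--     if n<4:
--         return False
--     for k in range(1,n-2):
--         if CzyRosnacy(tab[:k+1]) and CzyMalejacy(tab[k+1:]):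
--             return True
--     return False
-- ===== SOURCE B (Python) =====
-- def CzyRosnacoMalejacy(tab):
--     n = len(tab)
--     if n < 4:
--         return False
--     pairs = list(zip(tab, tab[1:]))
--     p = 1
--     for a, b in pairs:
--         if a >= b:
--             p += 1
--         else:
--             break
--     s = n - 1
--     for a, b in reversed(pairs):
--         if a < b:
--             s -= 1
--         else:
--             break
--     return max(1, s - 1) <= min(n - 3, p - 1)
-- ===== Notes on version B (the rewrite author's own statement) =====
-- stated objective: faster
-- what changed: Instead of trying every split point k and re-scanning the prefix and suffix (O(n^2)), B makes one pass over adjacent pairs to find the longest non-increasing prefix and the longest strictly-increasing suffix, then checks with one interval inequality whether a valid split index exists.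
import Mathlib
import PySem

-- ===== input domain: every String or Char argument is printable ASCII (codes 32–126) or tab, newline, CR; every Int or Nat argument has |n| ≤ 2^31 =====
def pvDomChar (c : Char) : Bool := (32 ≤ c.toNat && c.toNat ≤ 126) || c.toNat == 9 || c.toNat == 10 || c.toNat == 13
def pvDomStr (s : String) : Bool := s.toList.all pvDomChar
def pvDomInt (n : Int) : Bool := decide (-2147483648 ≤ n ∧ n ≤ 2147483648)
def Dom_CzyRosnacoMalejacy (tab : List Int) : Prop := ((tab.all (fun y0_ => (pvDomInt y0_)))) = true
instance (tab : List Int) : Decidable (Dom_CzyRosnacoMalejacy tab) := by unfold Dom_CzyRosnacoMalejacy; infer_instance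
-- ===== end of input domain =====

-- B replaces A's quadratic try-every-split scan by one linear pass over adjacent pairs
-- (longest non-increasing prefix / strictly-increasing suffix) plus an interval test; equal return value proved.

-- ===== PORT A =====
def CzyRosnacy (tab : List Int) : Bool :=
  let n : Int := tab.length
  (PySem.List.pyRange 1 n 1).all fun i =>
    !(decide (PySem.List.pyGetD tab (i-1) 0 < PySem.List.pyGetD tab i 0))

def CzyMalejacy (tab : List Int) : Bool :=
  let n : Int := tab.length
  (PySem.List.pyRange 1 n 1).all fun i =>
    decide (PySem.List.pyGetD tab (i-1) 0 < PySem.List.pyGetD tab i 0)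

def CzyRosnacoMalejacy (tab : List Int) : Bool :=
  let n : Int := tab.length
  if n < 4 then false
  else (PySem.List.pyRange 1 (n-2) 1).any fun k =>
    CzyRosnacy (PySem.List.slice tab none (some (k+1))) &&
    CzyMalejacy (PySem.List.slice tab (some (k+1)) none)

-- ===== PORT B =====
-- the 'for … break' counting loops of Source B
def pvCountWhile (c : Int × Int → Bool) : List (Int × Int) → Nat
  | [] => 0
  | x :: xs => if c x then pvCountWhile c xs + 1 else 0

def CzyRosnacoMalejacy_alt (tab : List Int) : Bool :=
  let n : Int := tab.length
  if n < 4 then false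
  else
    let pairs := tab.zip tab.tail
    let p : Int := 1 + pvCountWhile (fun ab => ab.1 ≥ ab.2) pairs
    let s : Int := n - 1 - pvCountWhile (fun ab => ab.1 < ab.2) pairs.reverse
    decide (max 1 (s - 1) ≤ min (n - 3) (p - 1))

-- ===== PRECONDITION & SPEC =====
def Spec_CzyRosnacoMalejacy (tab : List Int) (out : Bool) : Prop := out = CzyRosnacoMalejacy_alt tab
instance (tab : List Int) (out : Bool) : Decidable (Spec_CzyRosnacoMalejacy tab out) := by unfold Spec_CzyRosnacoMalejacy; infer_instance

-- ===== CLAIM (what is proved, stated in full; the proofs are below) =====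
def Claim_equal_CzyRosnacoMalejacy : Prop := ∀ (tab : List Int), Dom_CzyRosnacoMalejacy tab → Spec_CzyRosnacoMalejacy tab (CzyRosnacoMalejacy tab)

-- ===== LEMMAS AND PROOFS =====

lemma pred_ge_eq : (fun ab : Int × Int => !decide (ab.1 < ab.2)) = (fun ab : Int × Int => decide (ab.1 ≥ ab.2)) := by
  funext ab
  rw [← decide_not, decide_eq_decide]
  omega

lemma pvCountWhile_le_length (c : Int × Int → Bool) (l : List (Int × Int)) :
    pvCountWhile c l ≤ l.length := by
  induction l with
  | nil => simp [pvCountWhile]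
  | cons x xs ih =>
    by_cases h : c x
    · simp [pvCountWhile, h]; omega
    · simp [pvCountWhile, h]

lemma all_take_countWhile (c : Int × Int → Bool) (l : List (Int × Int)) (m : Nat) :
    (l.take m).all c = decide (min m l.length ≤ pvCountWhile c l) := by
  induction l generalizing m with
  | nil => simp
  | cons x xs ih =>
    cases m with
    | zero => simp
    | succ j =>
      by_cases h : c x
      · simp [pvCountWhile, h, ih]
      · simp [pvCountWhile, h]

lemma all_drop_countWhile (c : Int × Int → Bool) (l : List (Int × Int)) (m : Nat) :
    (l.drop m).all c = decide (l.length - m ≤ pvCountWhile c l.reverse) := by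
  have h1 : (l.drop m).all c = (l.drop m).reverse.all c := by
    rw [List.all_reverse]
  have h2 : (l.drop m).reverse = l.reverse.take (l.length - m) := by
    rw [List.reverse_drop]
  rw [h1, h2, all_take_countWhile]
  rw [decide_eq_decide]
  have := l.length_reverse
  omega

lemma zip_tail_take (l : List Int) (m : Nat) :
    (l.take (m+1)).zip (l.take (m+1)).tail = (l.zip l.tail).take m := by
  induction l generalizing m with
  | nil => simp
  | cons a xs ih =>
    cases m with
    | zero => simp
    | succ j =>
      cases xs with
      | nil => simp
      | cons b ys =>
        have := ih (m := j)
        simp_all [List.take_succ_cons]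

lemma zip_tail_drop (l : List Int) (m : Nat) :
    (l.drop m).zip (l.drop m).tail = (l.zip l.tail).drop m := by
  induction l generalizing m with
  | nil => simp
  | cons a xs ih =>
    cases m with
    | zero => simp
    | succ j =>
      cases xs with
      | nil => simp
      | cons b ys => simpa using ih (m := j)

lemma loop_eq_pairs_all (f : Int → Int → Bool) (l : List Int) :
    ((PySem.List.pyRange 1 (l.length : Int) 1).all fun i =>
       f (PySem.List.pyGetD l (i-1) 0) (PySem.List.pyGetD l i 0))
    = (l.zip l.tail).all (fun ab => f ab.1 ab.2) := by
  rw [Bool.eq_iff_iff, List.all_eq_true, List.all_eq_true]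
  constructor
  · intro h ab hab
    obtain ⟨j, hj, hget⟩ := List.getElem_of_mem hab
    have hjl : j + 1 < l.length := by
      simp [List.length_zip, List.length_tail] at hj
      omega
    have hmem : ((j : Int) + 1) ∈ PySem.List.pyRange 1 (l.length : Int) 1 := by
      rw [PySem.List.mem_pyRange_one]
      constructor <;> [omega; exact_mod_cast hjl]
    have hh := h _ hmem
    have e1 : (j : Int) + 1 - 1 = (j : Int) := by ring
    have e2 : (j : Int) + 1 = ((j + 1 : Nat) : Int) := by push_cast; ring
    rw [e1, e2, PySem.List.pyGetD_natCast, PySem.List.pyGetD_natCast] at hh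
    rw [List.getD_eq_getElem l 0 (by omega), List.getD_eq_getElem l 0 hjl] at hh
    have hzip : ab = (l[j], l[j+1]) := by
      rw [← hget]
      simp [List.getElem_zip, List.getElem_tail]
    rw [hzip]
    exact hh
  · intro h i hi
    rw [PySem.List.mem_pyRange_one] at hi
    obtain ⟨h1, h2⟩ := hi
    set j : Nat := (i - 1).toNat with hjdef
    have hij : i = (j : Int) + 1 := by omega
    have hjl : j + 1 < l.length := by omega
    have hpl : j < (l.zip l.tail).length := by
      simp [List.length_zip, List.length_tail]; omega
    have := h _ (List.getElem_mem hpl)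
    simp only [List.getElem_zip, List.getElem_tail] at this
    have e2 : i = ((j + 1 : Nat) : Int) := by push_cast; omega
    rw [hij]
    have e1 : (j : Int) + 1 - 1 = (j : Int) := by ring
    rw [e1, ← hij, e2, PySem.List.pyGetD_natCast, PySem.List.pyGetD_natCast]
    rw [List.getD_eq_getElem l 0 (by omega), List.getD_eq_getElem l 0 hjl]
    exact this

lemma czyRosnacy_take (l : List Int) (m : Nat) :
    CzyRosnacy (l.take (m+1)) =
      ((l.zip l.tail).take m).all (fun ab => !(decide (ab.1 < ab.2))) := by
  unfold CzyRosnacy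
  rw [loop_eq_pairs_all (fun a b => !(decide (a < b))) (l.take (m+1)), zip_tail_take]

lemma czyMalejacy_drop (l : List Int) (m : Nat) :
    CzyMalejacy (l.drop m) =
      ((l.zip l.tail).drop m).all (fun ab => decide (ab.1 < ab.2)) := by
  unfold CzyMalejacy
  rw [loop_eq_pairs_all (fun a b => decide (a < b)) (l.drop m), zip_tail_drop]

-- ===== VERDICT (by name: the statement is the Claim_ definition above) =====
theorem CzyRosnacoMalejacy_spec : Claim_equal_CzyRosnacoMalejacy := by
  intro tab _
  unfold Spec_CzyRosnacoMalejacy CzyRosnacoMalejacy CzyRosnacoMalejacy_alt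
  simp only []
  by_cases hn : (tab.length : Int) < 4
  · simp [hn]
  · simp only [hn, if_false]
    have hn4 : 4 ≤ tab.length := by exact_mod_cast not_lt.mp hn
    set pairs := tab.zip tab.tail with hpairs
    have hplen : pairs.length = tab.length - 1 := by
      simp [hpairs, List.length_zip, List.length_tail]
    set P := pvCountWhile (fun ab => ab.1 ≥ ab.2) pairs with hP
    set S := pvCountWhile (fun ab => ab.1 < ab.2) pairs.reverse with hS
    have hPle : P ≤ pairs.length := pvCountWhile_le_length _ _
    have hSle : S ≤ pairs.length := by
      have := pvCountWhile_le_length (fun ab => ab.1 < ab.2) pairs.reverse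
      simpa using this
    rw [Bool.eq_iff_iff, List.any_eq_true, decide_eq_true_iff]
    constructor
    · rintro ⟨k, hkmem, hk⟩
      rw [PySem.List.mem_pyRange_one] at hkmem
      obtain ⟨hk1, hk2⟩ := hkmem
      rw [Bool.and_eq_true] at hk
      obtain ⟨hpre, hsuf⟩ := hk
      set j : Nat := k.toNat with hjdef
      have hkj : k = (j : Int) := by omega
      have hjb : 1 ≤ j ∧ j + 2 < tab.length := by
        constructor <;> omega
      -- prefix
      rw [hkj] at hpre hsuf
      have e1 : (j : Int) + 1 = ((j + 1 : Nat) : Int) := by push_cast; ring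
      rw [e1, PySem.List.slice_to tab (b := ((j + 1 : Nat) : Int)) (by omega)] at hpre
      rw [e1, PySem.List.slice_from tab (a := ((j + 1 : Nat) : Int)) (by omega)] at hsuf
      rw [Int.toNat_natCast] at hpre hsuf
      rw [czyRosnacy_take, all_take_countWhile, pred_ge_eq] at hpre
      rw [czyMalejacy_drop, all_drop_countWhile] at hsuf
      rw [decide_eq_true_iff] at hpre hsuf
      rw [← hpairs, ← hP] at hpre
      rw [← hpairs, ← hS] at hsuf
      omega
    · intro hineq
      -- witness split index
      set s : Int := (tab.length : Int) - 1 - S with hsdef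
      refine ⟨max 1 (s - 1), ?_, ?_⟩
      · rw [PySem.List.mem_pyRange_one]
        constructor <;> omega
      · set k : Int := max 1 (s - 1) with hkdef
        set j : Nat := k.toNat with hjdef
        have hkj : k = (j : Int) := by omega
        rw [Bool.and_eq_true]
        have e1 : k + 1 = ((j + 1 : Nat) : Int) := by push_cast; omega
        constructor
        · rw [e1, PySem.List.slice_to tab (b := ((j + 1 : Nat) : Int)) (by omega), Int.toNat_natCast,
            czyRosnacy_take, all_take_countWhile, pred_ge_eq, ← hpairs, ← hP, decide_eq_true_iff]
          omega
        · rw [e1, PySem.List.slice_from tab (a := ((j + 1 : Nat) : Int)) (by omega), Int.toNat_natCast,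
            czyMalejacy_drop, all_drop_countWhile, ← hpairs, ← hS, decide_eq_true_iff]
          omega
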